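-- pv_equiv track=rewrite | github.com/WSU-4110/ScheduleWorks | schedule-works-be/scheduler.py | format_for_add
-- ===== SOURCE A (Python) =====
-- def format_for_add(source):
--     source = str(source)
--     source = source.split(" ")
--     formatted_list = []
--     temp = []
--     for i, entry in enumerate(source):
--         curr = i % 3
--         if curr == 0:
--             temp.append(entry)
--         if curr == 1:
--             temp[curr - 1] = temp[curr - 1] + " " + entry
--         elif curr == 2:
--             temp.append(entry)
--             formatted_list.append(temp.copy())
--             temp.clear()
--     return formatted_list
-- ===== SOURCE B (Python) =====
-- def format_for_add(source):
--     toks = str(source).split(" ")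
--     out = []
--     i = 0
--     while i + 2 < len(toks):
--         out.append([toks[i] + " " + toks[i + 1], toks[i + 2]])
--         i += 3
--     return out
-- ===== Notes on version B (the rewrite author's own statement) =====
-- stated objective: simpler
-- what changed: B strides over the start index of each complete triple and indexes the other two tokens directly, replacing A's enumerate/mod-3 state machine with its temp buffer, copy and clear.
import Mathlib
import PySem

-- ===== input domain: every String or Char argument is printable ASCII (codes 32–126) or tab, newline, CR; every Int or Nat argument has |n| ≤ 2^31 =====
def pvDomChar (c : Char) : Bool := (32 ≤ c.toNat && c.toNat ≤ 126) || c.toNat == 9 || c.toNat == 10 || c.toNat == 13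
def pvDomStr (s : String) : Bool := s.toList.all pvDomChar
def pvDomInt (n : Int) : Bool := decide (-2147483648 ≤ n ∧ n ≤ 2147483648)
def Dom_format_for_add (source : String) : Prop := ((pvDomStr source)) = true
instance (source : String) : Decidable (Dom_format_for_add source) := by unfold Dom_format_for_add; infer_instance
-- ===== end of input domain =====

-- B replaces A's enumerate/mod-3 state machine (temp buffer, copy, clear) by a stride loop over
-- the start index of each complete triple with direct indexing; objective: simpler.

-- ===== PORT A =====
-- the for-loop over enumerate(source) with state (formatted_list, temp); i is the enumerate index.
-- temp[0] assignment uses List.set/getD: in Python temp is provably nonempty when curr == 1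
-- (the previous iteration had curr == 0 and appended), so the total forms are exact there.
def loopA_fa : List String → Nat → List (List String) × List String → List (List String) × List String
  | [], _, st => st
  | entry :: rest, i, (fl, temp) =>
    let curr := i % 3
    let temp := if curr = 0 then temp ++ [entry] else temp
    if curr = 1 then
      loopA_fa rest (i + 1) (fl, temp.set (curr - 1) (temp.getD (curr - 1) "" ++ " " ++ entry))
    else if curr = 2 then
      loopA_fa rest (i + 1) (fl ++ [temp ++ [entry]], [])
    else
      loopA_fa rest (i + 1) (fl, temp)

def format_for_add (source : String) : List (List String) :=
  (loopA_fa (((PySem.Str.split? source " ").getD [])) 0 ([], [])).1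

-- ===== PORT B =====
-- the while-loop of Source B; toks[i], toks[i+1], toks[i+2] are in range under the guard, so getD is exact.
def loopB_fa (toks : List String) (i : Nat) (out : List (List String)) : List (List String) :=
  if i + 2 < toks.length then
    loopB_fa toks (i + 3)
      (out ++ [[toks.getD i "" ++ " " ++ toks.getD (i + 1) "", toks.getD (i + 2) ""]])
  else out
termination_by toks.length - i

def format_for_add_alt (source : String) : List (List String) :=
  loopB_fa (((PySem.Str.split? source " ").getD [])) 0 []

-- ===== PRECONDITION & SPEC =====
def Spec_format_for_add (source : String) (out : List (List String)) : Prop := out = format_for_add_alt source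
instance (source : String) (out : List (List String)) : Decidable (Spec_format_for_add source out) := by unfold Spec_format_for_add; infer_instance

-- ===== CLAIM (what is proved, stated in full; the proofs are below) =====
def Claim_equal_format_for_add : Prop := ∀ (source : String), Dom_format_for_add source → Spec_format_for_add source (format_for_add source)

-- ===== LEMMAS AND PROOFS =====

theorem loop_agree (ts toks : List String) (k : Nat) (out : List (List String))
    (h : toks.drop (3 * k) = ts) :
    (loopA_fa ts (3 * k) (out, [])).1 = loopB_fa toks (3 * k) out := by
  have hlen : ts.length = toks.length - 3 * k := by
    rw [← h, List.length_drop]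
  match ts, h with
  | [], h =>
    rw [loopB_fa]
    simp only [List.length_nil] at hlen
    rw [if_neg (by omega)]
    rfl
  | [a], h =>
    rw [loopB_fa]
    simp only [List.length_singleton] at hlen
    rw [if_neg (by omega)]
    simp [loopA_fa, Nat.mul_mod_right]
  | [a, b], h =>
    rw [loopB_fa]
    simp only [List.length_cons, List.length_nil] at hlen
    rw [if_neg (by omega)]
    have h0 : (3 * k) % 3 = 0 := by omega
    have h1 : (3 * k + 1) % 3 = 1 := by omega
    simp [loopA_fa, h0, h1]
  | a :: b :: c :: r, h =>
    simp only [List.length_cons] at hlen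
    have hg : 3 * k + 2 < toks.length := by omega
    have g0 : toks.getD (3 * k) "" = a := by
      have : toks[3 * k]? = some a := by
        rw [show (3 * k) = 3 * k + 0 by omega, ← List.getElem?_drop, h]; rfl
      simp [List.getD_eq_getElem?_getD, this]
    have g1 : toks.getD (3 * k + 1) "" = b := by
      have : toks[3 * k + 1]? = some b := by
        rw [← List.getElem?_drop, h]; rfl
      simp [List.getD_eq_getElem?_getD, this]
    have g2 : toks.getD (3 * k + 2) "" = c := by
      have : toks[3 * k + 2]? = some c := by
        rw [← List.getElem?_drop, h]; rfl
      simp [List.getD_eq_getElem?_getD, this]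
    have h0 : (3 * k) % 3 = 0 := by omega
    have h1 : (3 * k + 1) % 3 = 1 := by omega
    have h2 : (3 * k + 2) % 3 = 2 := by omega
    have hr : toks.drop (3 * (k + 1)) = r := by
      have : toks.drop (3 * (k + 1)) = (toks.drop (3 * k)).drop 3 := by
        rw [List.drop_drop]; ring_nf
      rw [this, h]; rfl
    have ih := loop_agree r toks (k + 1) (out ++ [[a ++ " " ++ b, c]]) hr
    rw [loopB_fa, if_pos hg, g0, g1, g2]
    simp only [loopA_fa, h0, h1, h2]
    norm_num
    rw [show 3 * k + 1 + 1 + 1 = 3 * (k + 1) by ring]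
    exact ih
termination_by ts.length

-- ===== VERDICT (by name: the statement is the Claim_ definition above) =====
theorem format_for_add_spec : Claim_equal_format_for_add := by
  intro source _
  unfold Spec_format_for_add format_for_add format_for_add_alt
  exact loop_agree _ _ 0 [] (by simp)
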